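-- pv_equiv track=rewrite | github.com/thesavant42/layerslayer | app/modules/formatters/formatters.py | _tarinfo_mode_to_string
-- ===== SOURCE A (Python) =====
-- def _tarinfo_mode_to_string(mode: int, typeflag: str) -> str:
--     """Convert tarfile mode integer to ls-style permission string."""
--     type_char = {'5': 'd', '2': 'l', '0': '-'}.get(typeflag, '-')
--
--     perms = ''
--     for shift in [6, 3, 0]:
--         bits = (mode >> shift) & 0o7
--         perms += 'r' if bits & 4 else '-'
--         perms += 'w' if bits & 2 else '-'
--         perms += 'x' if bits & 1 else '-'
--
--     return type_char + perms
-- ===== SOURCE B (Python) =====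
-- def _tarinfo_mode_to_string(mode: int, typeflag: str) -> str:
--     """Convert tarfile mode integer to ls-style permission string."""
--     type_char = {'5': 'd', '2': 'l', '0': '-'}.get(typeflag, '-')
--     perms = ''.join(ch if (mode >> (8 - i)) & 1 else '-'
--                     for i, ch in enumerate('rwxrwxrwx'))
--     return type_char + perms
-- ===== Notes on version B (the rewrite author's own statement) =====
-- stated objective: simpler
-- what changed: Replaces the grouped 3x3 shift-and-mask loop (extract an octal digit per group, then test bits 4/2/1 of it) with one linear pass over the nine positions of 'rwxrwxrwx', testing single bit 8-i of the mode directly.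
import Mathlib
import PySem

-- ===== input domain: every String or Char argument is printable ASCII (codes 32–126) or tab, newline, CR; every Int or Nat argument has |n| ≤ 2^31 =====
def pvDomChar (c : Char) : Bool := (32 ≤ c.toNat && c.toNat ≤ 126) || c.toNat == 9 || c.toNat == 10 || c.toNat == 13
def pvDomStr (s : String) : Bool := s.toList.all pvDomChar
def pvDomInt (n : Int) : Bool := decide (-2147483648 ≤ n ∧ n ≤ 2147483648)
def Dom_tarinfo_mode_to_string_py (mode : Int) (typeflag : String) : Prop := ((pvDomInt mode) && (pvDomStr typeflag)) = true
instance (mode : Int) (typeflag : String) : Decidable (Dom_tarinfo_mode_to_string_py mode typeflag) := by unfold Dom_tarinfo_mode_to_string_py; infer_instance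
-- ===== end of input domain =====

-- B replaces A's grouped 3x3 shift-and-mask loop by one linear pass over the nine
-- positions of 'rwxrwxrwx', testing a single bit of the mode per position (simpler).

-- ===== PORT A =====
-- Literal port of A; strings are built as List Char (Python += on str), the shift
-- amounts are the nonnegative literals 6, 3, 0.
def tarinfo_mode_to_string_py (mode : Int) (typeflag : String) : String :=
  let type_char : Char :=
    PySem.Dict.getD (PySem.Dict.ofList [("5", 'd'), ("2", 'l'), ("0", '-')]) typeflag '-'
  let perms : List Char :=
    [6, 3, 0].foldl (fun (acc : List Char) (shift : Nat) =>
      let bits : Int := PySem.Int.band (mode >>> shift) 7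
      ((acc ++ [if PySem.Int.band bits 4 ≠ 0 then 'r' else '-'])
            ++ [if PySem.Int.band bits 2 ≠ 0 then 'w' else '-'])
            ++ [if PySem.Int.band bits 1 ≠ 0 then 'x' else '-']) []
  String.mk (type_char :: perms)

-- ===== PORT B =====
-- Literal port of Source B; the enumerate index i ranges over 0..8, so the shift
-- amount (8 - i).toNat is exactly Python's 8 - i (always nonnegative here).
def tarinfo_mode_to_string_py_alt (mode : Int) (typeflag : String) : String :=
  let type_char : Char :=
    PySem.Dict.getD (PySem.Dict.ofList [("5", 'd'), ("2", 'l'), ("0", '-')]) typeflag '-'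
  let perms : List Char :=
    (PySem.List.enumerate "rwxrwxrwx".toList).map
      (fun ic =>
        let k : Nat := (8 - ic.1).toNat   -- Python's 8 - i, a nonnegative shift here
        if PySem.Int.band (mode >>> k) 1 ≠ 0 then ic.2 else '-')
  String.mk (type_char :: perms)

-- ===== PRECONDITION & SPEC =====
def Spec_tarinfo_mode_to_string_py (mode : Int) (typeflag : String) (out : String) : Prop := out = tarinfo_mode_to_string_py_alt mode typeflag
instance (mode : Int) (typeflag : String) (out : String) : Decidable (Spec_tarinfo_mode_to_string_py mode typeflag out) := by unfold Spec_tarinfo_mode_to_string_py; infer_instance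

-- ===== CLAIM (what is proved, stated in full; the proofs are below) =====
def Claim_equal_tarinfo_mode_to_string_py : Prop := ∀ (mode : Int) (typeflag : String), Dom_tarinfo_mode_to_string_py mode typeflag → Spec_tarinfo_mode_to_string_py mode typeflag (tarinfo_mode_to_string_py mode typeflag)

-- ===== LEMMAS AND PROOFS =====

-- A's `bits & 7` is the low octal digit: x & 7 = x % 8 (Python semantics, all signs).
theorem pv_band_seven (x : Int) : PySem.Int.band x 7 = x % 8 := by
  simp only [PySem.Int.band, if_pos (by norm_num : (0:Int) ≤ 7)]
  split
  · have h : x.toNat &&& (7:Int).toNat = x.toNat % 8 := Nat.and_two_pow_sub_one_eq_mod x.toNat 3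
    rw [h]; omega
  · have h : (7:Int).toNat &&& (-x-1).toNat = (-x-1).toNat % 8 := by
      rw [Nat.and_comm]; exact Nat.and_two_pow_sub_one_eq_mod _ 3
    rw [h]; omega

-- Testing bit d ∈ {1,2,4} of an octal digit x % 8 is testing the parity of x / d.
theorem pv_bit_iff (x d : Int) (hd : d = 1 ∨ d = 2 ∨ d = 4) :
    PySem.Int.band (x % 8) d ≠ 0 ↔ (x / d) % 2 ≠ 0 := by
  have h0 : 0 ≤ x % 8 := by omega
  have hb : PySem.Int.band (x % 8) d = ((x % 8).toNat &&& d.toNat : Nat) := by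
    rcases hd with h|h|h <;> subst h <;> exact PySem.Int.band_of_nonneg h0 (by norm_num)
  rw [hb]
  rcases hd with h|h|h <;> subst h <;>
    rcases (by omega : x % 8 = 0 ∨ x % 8 = 1 ∨ x % 8 = 2 ∨ x % 8 = 3 ∨ x % 8 = 4 ∨
        x % 8 = 5 ∨ x % 8 = 6 ∨ x % 8 = 7) with h|h|h|h|h|h|h|h <;>
    rw [h] <;> simp <;> omega

-- A's test of bit d ∈ {1,2,4} of the group at shift s coincides with B's test of
-- the single bit t = s + log2 d of the mode.
theorem pv_test_iff (m : Int) (s t : Nat) (d : Int)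
    (h : (d = 1 ∧ t = s) ∨ (d = 2 ∧ t = s + 1) ∨ (d = 4 ∧ t = s + 2)) :
    (PySem.Int.band (PySem.Int.band (m >>> s) 7) d ≠ 0) ↔
      (PySem.Int.band (m >>> t) 1 ≠ 0) := by
  rw [PySem.Int.band_one, PySem.Int.mod_eq_emod_of_pos (by norm_num), pv_band_seven,
    Int.shiftRight_eq_div_pow, Int.shiftRight_eq_div_pow,
    pv_bit_iff _ d (by rcases h with ⟨h,_⟩|⟨h,_⟩|⟨h,_⟩ <;> omega)]
  rcases h with ⟨hd, ht⟩|⟨hd, ht⟩|⟨hd, ht⟩ <;> subst hd <;> subst ht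
  · simp
  · rw [Int.ediv_ediv_of_nonneg (by positivity)]
    have : ((2:Int)^s*2) = ((2^(s+1) : Nat) : Int) := by push_cast [pow_succ]; ring
    push_cast at this ⊢
    rw [this]
  · rw [Int.ediv_ediv_of_nonneg (by positivity)]
    have : ((2:Int)^s*4) = ((2^(s+2) : Nat) : Int) := by push_cast [pow_succ]; ring
    push_cast at this ⊢
    rw [this]

-- The s = 0 group of A, after `m >>> 0` has been simplified away.
theorem pv_test_iff_zero (m : Int) (t : Nat) (d : Int)
    (h : (d = 1 ∧ t = 0) ∨ (d = 2 ∧ t = 0 + 1) ∨ (d = 4 ∧ t = 0 + 2)) :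
    (PySem.Int.band (PySem.Int.band m 7) d ≠ 0) ↔ (PySem.Int.band (m >>> t) 1 ≠ 0) := by
  simpa using pv_test_iff m 0 t d h

-- ===== VERDICT (by name: the statement is the Claim_ definition above) =====
theorem tarinfo_mode_to_string_py_spec : Claim_equal_tarinfo_mode_to_string_py := by
  intro mode typeflag _
  unfold Spec_tarinfo_mode_to_string_py tarinfo_mode_to_string_py tarinfo_mode_to_string_py_alt
  have henum : PySem.List.enumerate "rwxrwxrwx".toList =
      [(0,'r'),(1,'w'),(2,'x'),(3,'r'),(4,'w'),(5,'x'),(6,'r'),(7,'w'),(8,'x')] := by decide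
  simp only [List.foldl_cons, List.foldl_nil, henum, List.map_cons,
    List.map_nil, List.nil_append, List.cons_append]
  norm_num [pv_test_iff mode 6 8 4 (by norm_num), pv_test_iff mode 6 7 2 (by norm_num),
    pv_test_iff mode 6 6 1 (by norm_num), pv_test_iff mode 3 5 4 (by norm_num),
    pv_test_iff mode 3 4 2 (by norm_num), pv_test_iff mode 3 3 1 (by norm_num),
    pv_test_iff mode 0 2 4 (by norm_num), pv_test_iff mode 0 1 2 (by norm_num),
    pv_test_iff mode 0 0 1 (by norm_num),
    pv_test_iff_zero mode 2 4 (by norm_num), pv_test_iff_zero mode 1 2 (by norm_num),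
    pv_test_iff_zero mode 0 1 (by norm_num),
    show Int.toNat 8 = 8 from rfl, show Int.toNat 7 = 7 from rfl,
    show Int.toNat 6 = 6 from rfl, show Int.toNat 5 = 5 from rfl,
    show Int.toNat 4 = 4 from rfl, show Int.toNat 3 = 3 from rfl,
    show Int.toNat 2 = 2 from rfl, show Int.toNat 1 = 1 from rfl,
    show Int.toNat 0 = 0 from rfl]
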